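-- pv_equiv track=rewrite | github.com/lmoore36/comp110-23s-workspace | lessons/function_writing.py | reverse_multiply
-- ===== SOURCE A (Python) =====
-- def reverse_multiply(input: list[int]) -> list[int]:
--     """Returns a list of reversly multiplied integers."""
--     new_list: list = []
--     idx: int = len(input) - 1
--
--     while idx >= 0:
--         new_list.append(input[idx])
--         idx -= 1
--
--     i: int = 0
--
--     while i < len(new_list):
--         new_list[i] = new_list[i] * 2
--         i+=1
--
--     return new_list
-- ===== SOURCE B (Python) =====
-- def reverse_multiply(input: list[int]) -> list[int]:
--     """Returns a list of reversly multiplied integers."""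
--     return [x * 2 for x in reversed(input)]
-- ===== Notes on version B (the rewrite author's own statement) =====
-- stated objective: simpler
-- what changed: Replaces A's two passes (an index-countdown loop that copies in reverse, then an in-place doubling loop over the copy) with one fused comprehension over reversed(input) that doubles while reversing.
import Mathlib
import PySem

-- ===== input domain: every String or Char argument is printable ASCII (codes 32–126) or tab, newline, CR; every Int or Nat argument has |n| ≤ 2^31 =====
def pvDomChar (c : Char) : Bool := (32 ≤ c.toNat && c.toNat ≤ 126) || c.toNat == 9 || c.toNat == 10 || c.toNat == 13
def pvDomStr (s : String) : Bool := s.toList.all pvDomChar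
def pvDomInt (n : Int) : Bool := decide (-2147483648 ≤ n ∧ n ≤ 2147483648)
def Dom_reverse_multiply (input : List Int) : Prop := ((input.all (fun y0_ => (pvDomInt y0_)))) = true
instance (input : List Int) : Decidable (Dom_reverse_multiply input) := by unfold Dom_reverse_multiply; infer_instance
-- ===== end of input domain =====

-- B fuses A's two passes (reverse-copy loop, then in-place doubling loop) into one
-- comprehension over reversed(input); objective: simpler. No mutation of the argument in either version.

-- ===== PORT A =====
-- first while loop: while idx >= 0: new_list.append(input[idx]); idx -= 1
def rmLoop1 (input : List Int) (idx : Int) (acc : List Int) : List Int :=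
  if _h : 0 ≤ idx then
    rmLoop1 input (idx - 1) (acc ++ [(PySem.List.pyGet? input idx).getD 0])
  else acc
termination_by (idx + 1).toNat
decreasing_by omega

-- second while loop: while i < len(new_list): new_list[i] = new_list[i] * 2; i += 1
def rmLoop2 (l : List Int) (i : Nat) : List Int :=
  if h : i < l.length then
    rmLoop2 (l.set i (l[i] * 2)) (i + 1)
  else l
termination_by l.length - i
decreasing_by simp; omega

def reverse_multiply (input : List Int) : List Int :=
  rmLoop2 (rmLoop1 input ((input.length : Int) - 1) []) 0

-- ===== PORT B =====
def reverse_multiply_alt (input : List Int) : List Int :=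
  input.reverse.map (fun x => x * 2)

-- ===== PRECONDITION & SPEC =====
def Spec_reverse_multiply (input : List Int) (out : List Int) : Prop := out = reverse_multiply_alt input
instance (input : List Int) (out : List Int) : Decidable (Spec_reverse_multiply input out) := by unfold Spec_reverse_multiply; infer_instance

-- ===== CLAIM (what is proved, stated in full; the proofs are below) =====
def Claim_equal_reverse_multiply : Prop := ∀ (input : List Int), Dom_reverse_multiply input → Spec_reverse_multiply input (reverse_multiply input)

-- ===== LEMMAS AND PROOFS =====

theorem rmLoop1_eq (input : List Int) :
    ∀ (n : Nat), n ≤ input.length → ∀ (acc : List Int),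
      rmLoop1 input ((n : Int) - 1) acc = acc ++ (input.take n).reverse := by
  intro n
  induction n with
  | zero =>
    intro _ acc
    rw [rmLoop1]
    simp
  | succ k ih =>
    intro hn acc
    rw [rmLoop1]
    have hk : k < input.length := by omega
    have hcast : ((k + 1 : Nat) : Int) - 1 = (k : Int) := by push_cast; ring
    rw [hcast, dif_pos (Int.natCast_nonneg k), PySem.List.pyGet?_natCast,
      List.getElem?_eq_getElem hk]
    have ht : List.take (k + 1) input = List.take k input ++ [input[k]] := by
      rw [List.take_add_one, List.getElem?_eq_getElem hk]; rfl
    rw [ih (by omega), ht, List.reverse_append]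
    simp

theorem rmLoop2_eq : ∀ (post pre : List Int),
    rmLoop2 (pre ++ post) pre.length = pre ++ post.map (fun x => x * 2) := by
  intro post
  induction post with
  | nil =>
    intro pre
    rw [rmLoop2]
    rw [dif_neg (by simp)]
    simp
  | cons x xs ih =>
    intro pre
    rw [rmLoop2]
    rw [dif_pos (by simp)]
    have hget : (pre ++ x :: xs)[pre.length]'(by simp) = x := by
      simp
    rw [hget]
    have hset : (pre ++ x :: xs).set pre.length (x * 2) = (pre ++ [x * 2]) ++ xs := by
      rw [List.set_append_right _ _ (le_refl _)]
      simp
    rw [hset]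
    have hlen : pre.length + 1 = (pre ++ [x * 2]).length := by simp
    rw [hlen, ih (pre ++ [x * 2])]
    simp

-- ===== VERDICT (by name: the statement is the Claim_ definition above) =====
theorem reverse_multiply_spec : Claim_equal_reverse_multiply := by
  intro input _
  unfold Spec_reverse_multiply reverse_multiply reverse_multiply_alt
  have h1 : rmLoop1 input ((input.length : Int) - 1) [] = input.reverse := by
    have := rmLoop1_eq input input.length le_rfl []
    simpa using this
  have h2 := rmLoop2_eq input.reverse []
  simp only [List.nil_append, List.length_nil] at h2
  rw [h1, h2]
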